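-- pv_equiv track=rewrite | github.com/stratusadv/django-spire | django_spire/core/tag/tools.py | simplify_and_weight_tag_set_to_dict
-- ===== SOURCE A (Python) =====
-- def simplify_tag_set_to_list(tag_set: set[str]) -> list[str]:
--     simplified_tag_words = []
--
--     for tag in tag_set:
--         tag_words = tag.split('-')
--         simplified_tag_words.extend(tag_words)
--
--     return simplified_tag_words
--
-- def simplify_and_weight_tag_set_to_dict(tag_set: set[str]) -> dict[str, int]:
--     simplified_and_weighted_tag_words = {}
--
--     for tag_word in simplify_tag_set_to_list(tag_set):
--         simplified_and_weighted_tag_words[tag_word] = simplified_and_weighted_tag_words.get(tag_word, 0) + 1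
--
--     return dict(
--         sorted(
--             simplified_and_weighted_tag_words.items(),
--             key=lambda item: item[1],
--             reverse=True
--         )
--     )
-- ===== SOURCE B (Python) =====
-- def simplify_and_weight_tag_set_to_dict(tag_set: set[str]) -> dict[str, int]:
--     counts = {}
--     for tag in tag_set:
--         for word in tag.split('-'):
--             counts[word] = counts.get(word, 0) + 1
--     ordered = []
--     for c in range(max(counts.values(), default=0), 0, -1):
--         for item in counts.items():
--             if item[1] == c:
--                 ordered.append(item)
--     return dict(ordered)
-- ===== Notes on version B (the rewrite author's own statement) =====
-- stated objective: alternative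
-- what changed: B builds the same frequency dict but replaces A's comparison sort of the items by a counting/bucket pass: it iterates the count value c from max(counts.values()) down to 1 and emits each equal-count bucket in dict insertion order, which reproduces the stable reverse sort exactly.
import Mathlib
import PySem

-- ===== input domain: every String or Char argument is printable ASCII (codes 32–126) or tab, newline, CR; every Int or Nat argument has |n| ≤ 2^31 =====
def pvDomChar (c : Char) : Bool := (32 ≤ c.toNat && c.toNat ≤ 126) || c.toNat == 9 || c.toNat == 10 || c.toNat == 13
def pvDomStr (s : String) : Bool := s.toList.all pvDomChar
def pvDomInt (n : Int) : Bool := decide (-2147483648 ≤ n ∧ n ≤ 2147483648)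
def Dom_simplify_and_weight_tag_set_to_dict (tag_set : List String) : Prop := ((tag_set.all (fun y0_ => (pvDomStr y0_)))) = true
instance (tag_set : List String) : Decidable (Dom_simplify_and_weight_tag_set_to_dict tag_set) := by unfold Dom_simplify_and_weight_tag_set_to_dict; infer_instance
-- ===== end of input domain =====

-- B replaces A's comparison sort of the frequency items by a counting/bucket pass (iterate c from
-- max count down to 1 and emit each frequency bucket in dict insertion order); objective:
-- alternative — same observable result, a different sorting algorithm.
-- The Lean ports iterate the input list in its given order (Python's set iteration order is not
-- modelled); the returned dict is order-compared only through the proved equality of the two ports.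

-- ===== PORT A =====
-- s.split('-') for the literal nonempty separator '-' (exact: PySem.Chars.splitOn is s.split(sep) for sep ≠ '')
def pySplitDash (s : String) : List String :=
  (PySem.Chars.splitOn s.toList ['-']).map (fun cs => String.ofList cs)

def simplify_tag_set_to_list (tag_set : List String) : List String :=
  tag_set.foldl (fun acc tag => acc ++ pySplitDash tag) []

def simplify_and_weight_tag_set_to_dict (tag_set : List String) : List (String × Int) :=
  let d := (simplify_tag_set_to_list tag_set).foldl
      (fun d w => d.insert w (d.getD w 0 + 1)) PySem.Dict.empty
  (PySem.Dict.ofList (PySem.List.sorted d.items (fun item => item.2) true)).items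

-- ===== PORT B =====
def simplify_and_weight_tag_set_to_dict_alt (tag_set : List String) : List (String × Int) :=
  let counts := tag_set.foldl (fun d tag =>
      (pySplitDash tag).foldl (fun d w => d.insert w (d.getD w 0 + 1)) d)
    PySem.Dict.empty
  let ordered := (PySem.List.pyRange (PySem.List.maxD counts.values (fun v => v) 0) 0 (-1)).foldl
      (fun acc c => acc ++ counts.items.filter (fun item => item.2 == c)) []
  (PySem.Dict.ofList ordered).items

-- ===== PRECONDITION & SPEC =====
def Spec_simplify_and_weight_tag_set_to_dict (tag_set : List String) (out : List (String × Int)) : Prop := out = simplify_and_weight_tag_set_to_dict_alt tag_set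
instance (tag_set : List String) (out : List (String × Int)) : Decidable (Spec_simplify_and_weight_tag_set_to_dict tag_set out) := by unfold Spec_simplify_and_weight_tag_set_to_dict; infer_instance

-- ===== CLAIM (what is proved, stated in full; the proofs are below) =====
def Claim_equal_simplify_and_weight_tag_set_to_dict : Prop := ∀ (tag_set : List String), Dom_simplify_and_weight_tag_set_to_dict tag_set → Spec_simplify_and_weight_tag_set_to_dict tag_set (simplify_and_weight_tag_set_to_dict tag_set)

-- ===== LEMMAS AND PROOFS =====

-- split a countdown range at any point
theorem pyRange_neg_one_append (a b c : Int) (h1 : c ≤ b) (h2 : b ≤ a) :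
    PySem.List.pyRange a c (-1) = PySem.List.pyRange a b (-1) ++ PySem.List.pyRange b c (-1) := by
  rw [PySem.List.pyRange_neg_one_eq_reverse, PySem.List.pyRange_neg_one_eq_reverse,
    PySem.List.pyRange_neg_one_eq_reverse,
    PySem.List.pyRange_one_append (c + 1) (b + 1) (a + 1) (by omega) (by omega),
    List.reverse_append]

theorem pyRange_neg_one_singleton (a : Int) :
    PySem.List.pyRange a (a - 1) (-1) = [a] := by
  rw [PySem.List.pyRange_neg_one_cons (by omega), PySem.List.pyRange_neg_one_eq_nil (by omega)]

-- insertBy with a false prefix and a true suffix inserts exactly in the middle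
theorem insertBy_middle {α : Type} (before : α → α → Bool) (x : α) (P S : List α)
    (hP : ∀ y ∈ P, before x y = false) (hS : ∀ y ∈ S, before x y = true) :
    PySem.List.insertBy before x (P ++ S) = P ++ x :: S := by
  induction P with
  | nil =>
    cases S with
    | nil => rfl
    | cons s S' =>
      simp only [List.nil_append, PySem.List.insertBy, hS s (by simp)]
      simp
  | cons p P' ih =>
    have hp : before x p = false := hP p (by simp)
    simp only [List.cons_append, PySem.List.insertBy, hp]
    simp only [Bool.false_eq_true, if_false, List.cons.injEq, true_and]
    exact ih (fun y hy => hP y (by simp [hy]))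

-- the stable reverse sort by an Int key equals concatenation of the equal-key buckets,
-- taken for each key value from m down to 1 (any upper bound m of the keys, all keys positive)
theorem bucket_sorted (m : Int) (l : List (String × Int))
    (h : ∀ p ∈ l, 0 < p.2 ∧ p.2 ≤ m) :
    PySem.List.sorted l (fun it => it.2) true
      = (PySem.List.pyRange m 0 (-1)).flatMap (fun c => l.filter (fun it => it.2 == c)) := by
  induction l using List.reverseRecOn with
  | nil => simp [PySem.List.sorted_rev_eq_foldl_insertBy]
  | append_singleton l x ih =>
    have hx := h x (by simp)
    set k : Int := x.2 with hk
    have hl : ∀ p ∈ l, 0 < p.2 ∧ p.2 ≤ m := fun p hp => h p (by simp [hp])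
    -- left side: insert x into the sorted prefix
    have hL : PySem.List.sorted (l ++ [x]) (fun it => it.2) true
        = PySem.List.insertBy (fun a b => decide (b.2 < a.2)) x
            (PySem.List.sorted l (fun it => it.2) true) := by
      rw [PySem.List.sorted_rev_eq_foldl_insertBy, PySem.List.sorted_rev_eq_foldl_insertBy,
        List.foldl_append]
      rfl
    rw [hL, ih hl]
    -- range decomposition: [m..k+1], [k], [k-1..1]
    have hsplit1 : PySem.List.pyRange m 0 (-1)
        = PySem.List.pyRange m (k - 1) (-1) ++ PySem.List.pyRange (k - 1) 0 (-1) :=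
      pyRange_neg_one_append m (k - 1) 0 (by omega) (by omega)
    have hsplit2 : PySem.List.pyRange m (k - 1) (-1)
        = PySem.List.pyRange m k (-1) ++ [k] := by
      rw [pyRange_neg_one_append m k (k - 1) (by omega) (by omega), pyRange_neg_one_singleton]
    -- buckets of l ++ [x]
    have hbeq : (x.2 == k) = true := by simp [hk]
    have hbucket_hi : ∀ c ∈ PySem.List.pyRange m k (-1),
        (l ++ [x]).filter (fun it => it.2 == c) = l.filter (fun it => it.2 == c) := by
      intro c hc
      rw [PySem.List.mem_pyRange_neg_one] at hc
      simp only [List.filter_append, List.filter_cons, List.filter_nil]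
      have : (x.2 == c) = false := by simp; omega
      simp [this]
    have hbucket_lo : ∀ c ∈ PySem.List.pyRange (k - 1) 0 (-1),
        (l ++ [x]).filter (fun it => it.2 == c) = l.filter (fun it => it.2 == c) := by
      intro c hc
      rw [PySem.List.mem_pyRange_neg_one] at hc
      simp only [List.filter_append, List.filter_cons, List.filter_nil]
      have : (x.2 == c) = false := by simp; omega
      simp [this]
    have hbucket_k : (l ++ [x]).filter (fun it => it.2 == k)
        = l.filter (fun it => it.2 == k) ++ [x] := by
      simp only [List.filter_append, List.filter_cons, List.filter_nil, hbeq]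
      simp
    -- rewrite both sides into P ++ x :: S form
    have hmemP : ∀ y ∈ (PySem.List.pyRange m (k - 1) (-1)).flatMap
        (fun c => l.filter (fun it => it.2 == c)),
        (decide (y.2 < x.2)) = false := by
      intro y hy
      rw [List.mem_flatMap] at hy
      obtain ⟨c, hc, hyc⟩ := hy
      rw [PySem.List.mem_pyRange_neg_one] at hc
      have := List.of_mem_filter hyc
      have : y.2 = c := by simpa using this
      simp only [decide_eq_false_iff_not, not_lt, ← hk]
      omega
    have hmemS : ∀ y ∈ (PySem.List.pyRange (k - 1) 0 (-1)).flatMap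
        (fun c => l.filter (fun it => it.2 == c)),
        (decide (y.2 < x.2)) = true := by
      intro y hy
      rw [List.mem_flatMap] at hy
      obtain ⟨c, hc, hyc⟩ := hy
      rw [PySem.List.mem_pyRange_neg_one] at hc
      have := List.of_mem_filter hyc
      have : y.2 = c := by simpa using this
      simp only [decide_eq_true_eq, ← hk]
      omega
    rw [hsplit1]
    simp only [List.flatMap_append]
    rw [insertBy_middle _ _ _ _ hmemP hmemS]
    -- right side: distribute the buckets of l ++ [x]
    have hhi : (PySem.List.pyRange m (k - 1) (-1)).flatMap
          (fun c => (l ++ [x]).filter (fun it => it.2 == c))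
        = (PySem.List.pyRange m k (-1)).flatMap (fun c => l.filter (fun it => it.2 == c))
            ++ (l.filter (fun it => it.2 == k) ++ [x]) := by
      rw [hsplit2, List.flatMap_append]
      congr 1
      · rw [List.flatMap, List.flatMap, List.map_congr_left hbucket_hi]
      · simp only [List.flatMap_cons, List.flatMap_nil, List.append_nil]
        exact hbucket_k
    have hlo : (PySem.List.pyRange (k - 1) 0 (-1)).flatMap
          (fun c => (l ++ [x]).filter (fun it => it.2 == c))
        = (PySem.List.pyRange (k - 1) 0 (-1)).flatMap (fun c => l.filter (fun it => it.2 == c)) := by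
      rw [List.flatMap, List.flatMap, List.map_congr_left hbucket_lo]
    rw [hhi, hlo, hsplit2]
    simp only [List.flatMap_append, List.flatMap_cons, List.flatMap_nil, List.append_nil]
    simp

-- every value of a nonempty list is ≤ its maxD
theorem le_maxD_int (xs : List Int) (v : Int) (hv : v ∈ xs) :
    v ≤ PySem.List.maxD xs (fun x => x) 0 := by
  cases hmax : PySem.List.max? xs (fun x => x) with
  | none =>
    rw [PySem.List.max?_eq_none_iff] at hmax
    simp [hmax] at hv
  | some mx =>
    have := PySem.List.max?_isMax hmax v hv
    simpa [PySem.List.maxD, hmax] using this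

-- the common word list and the common counter dict of both ports
theorem dict_a_eq_counter (tag_set : List String) :
    (simplify_tag_set_to_list tag_set).foldl
        (fun d w => d.insert w (d.getD w 0 + 1)) PySem.Dict.empty
      = PySem.Dict.counter (tag_set.flatMap (fun t => pySplitDash t)) := by
  have : simplify_tag_set_to_list tag_set
      = tag_set.flatMap (fun t => pySplitDash t) := by
    unfold simplify_tag_set_to_list
    rw [PySem.List.foldl_append_eq_flatMap]
    simp
  rw [this, PySem.Dict.foldl_insert_getD_add_one_eq_counter]

theorem dict_b_eq_counter (tag_set : List String) :
    tag_set.foldl (fun d tag =>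
        (pySplitDash tag).foldl (fun d w => d.insert w (d.getD w 0 + 1)) d)
      PySem.Dict.empty
      = PySem.Dict.counter (tag_set.flatMap (fun t => pySplitDash t)) := by
  rw [← PySem.Dict.foldl_insert_getD_add_one_eq_counter, List.foldl_flatMap]

-- ===== VERDICT (by name: the statement is the Claim_ definition above) =====
theorem simplify_and_weight_tag_set_to_dict_spec : Claim_equal_simplify_and_weight_tag_set_to_dict := by
  intro tag_set _
  unfold Spec_simplify_and_weight_tag_set_to_dict
  unfold simplify_and_weight_tag_set_to_dict simplify_and_weight_tag_set_to_dict_alt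
  simp only [dict_a_eq_counter, dict_b_eq_counter]
  set words := tag_set.flatMap (fun t => pySplitDash t) with hw
  set d := PySem.Dict.counter words with hd
  congr 2
  rw [PySem.List.foldl_append_eq_flatMap, List.nil_append]
  apply bucket_sorted
  intro p hp
  have hp0 := hp
  rw [hd, PySem.Dict.items_counter] at hp
  rw [List.mem_map] at hp
  obtain ⟨w, hwmem, hpw⟩ := hp
  rw [PySem.Set.mem_ofList] at hwmem
  constructor
  · have : 0 < words.count w := List.count_pos_iff.mpr hwmem
    subst hpw
    simpa using this
  · apply le_maxD_int
    have hv : p.2 ∈ d.values := by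
      simp only [PySem.Dict.values]
      exact List.mem_map_of_mem hp0
    exact hv
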